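-- pv_equiv track=rewrite | github.com/chanderbhanswami/texas-data-scraper | src/processors/outlet_enricher.py | merge_outlet_details
-- ===== SOURCE A (Python) =====
-- from typing import List, Dict, Any, Optional, Set, Tuple
--
-- OUTLET_FIELDS = [
--     'outlet_number',
--     'outlet_name',
--     'outlet_address',
--     'outlet_city',
--     'outlet_state',
--     'outlet_zip_code',
--     'outlet_county_code',
--     'outlet_naics_code',
--     'outlet_inside_outside_city_limits_indicator',
--     'outlet_permit_issue_date',
--     'outlet_first_sales_date'
-- ]
--
-- def merge_outlet_details(outlets: List[Dict]) -> Dict: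
--     """
--     Merge multiple outlet records into a single comprehensive record
--
--     Args:
--         outlets: List of outlet records
--
--     Returns:
--         Merged outlet with most complete data
--     """
--     if not outlets:
--         return {}
--
--     if len(outlets) == 1:
--         return outlets[0]
--
--     # Score each outlet by completeness
--     def score(outlet):
--         return sum(1 for f in OUTLET_FIELDS if f in outlet and outlet[f])
--
--     # Sort by completeness (most complete first)
--     sorted_outlets = sorted(outlets, key=score, reverse=True)
--
--     # Start with most complete and fill gaps
--     merged = sorted_outlets[0].copy()
--     for outlet in sorted_outlets[1:]:
--         for field in OUTLET_FIELDS: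
--             if field not in merged or not merged[field]:
--                 if field in outlet and outlet[field]:
--                     merged[field] = outlet[field]
--
--     return merged
-- ===== SOURCE B (Python) =====
-- OUTLET_FIELDS = [
--     'outlet_number',
--     'outlet_name',
--     'outlet_address',
--     'outlet_city',
--     'outlet_state',
--     'outlet_zip_code',
--     'outlet_county_code',
--     'outlet_naics_code',
--     'outlet_inside_outside_city_limits_indicator',
--     'outlet_permit_issue_date',
--     'outlet_first_sales_date'
-- ]
--
-- def merge_outlet_details(outlets):
--     """Merge outlet records: functional two-pass construction (update the base
--     record's falsy fields by a first-truthy scan, then append the fresh fields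
--     donor by donor) instead of mutating a dict inside a nested fill loop."""
--     if not outlets:
--         return {}
--     if len(outlets) == 1:
--         return outlets[0]
--
--     def score(o):
--         return sum(1 for f in OUTLET_FIELDS if o.get(f))
--
--     order = sorted(outlets, key=score, reverse=True)
--     base, rest = order[0], order[1:]
--
--     def first_truthy(f, default):
--         for o in rest:
--             if o.get(f):
--                 return o[f]
--         return default
--
--     # pass 1: keep base's items, filling each falsy listed field from the rest
--     head = [(k, first_truthy(k, v) if k in OUTLET_FIELDS and not v else v)
--             for k, v in base.items()]
--
--     # pass 2: fields absent from base, appended in donor order as A's fill loop does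
--     seen = set(base)
--     tail = []
--     for o in rest:
--         for f in OUTLET_FIELDS:
--             if f not in seen and o.get(f):
--                 tail.append((f, o[f]))
--                 seen.add(f)
--     return dict(head + tail)
-- ===== Notes on version B (the rewrite author's own statement) =====
-- stated objective: alternative
-- what changed: Replaces A's destructive merge (copy the best record, then a nested donor-by-donor loop mutating one dict) with a functional two-pass construction: a head pass that patches each falsy listed field of the base record via a first-truthy scan of the remaining sorted outlets, and a tail pass that appends the fields absent from the base, guarded by a separate seen-set; the result dict is assembled once at the end.
import Mathlib
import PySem

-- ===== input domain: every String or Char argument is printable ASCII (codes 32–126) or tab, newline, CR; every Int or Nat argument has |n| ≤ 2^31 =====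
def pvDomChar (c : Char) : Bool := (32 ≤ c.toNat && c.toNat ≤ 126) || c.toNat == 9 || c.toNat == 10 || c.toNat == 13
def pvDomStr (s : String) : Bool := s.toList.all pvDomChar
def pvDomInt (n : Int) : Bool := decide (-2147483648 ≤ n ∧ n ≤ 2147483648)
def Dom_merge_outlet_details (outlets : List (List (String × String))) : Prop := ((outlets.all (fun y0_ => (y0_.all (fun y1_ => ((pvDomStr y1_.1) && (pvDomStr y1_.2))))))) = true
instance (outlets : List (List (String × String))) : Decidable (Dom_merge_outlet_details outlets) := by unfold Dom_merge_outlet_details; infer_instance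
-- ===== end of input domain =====

-- B rebuilds the merged record functionally in two passes (patch the base record's falsy
-- listed fields by a first-truthy scan of the rest, then append the fresh fields donor by
-- donor) instead of A's destructive nested fill loop over one mutated dict; objective:
-- alternative decomposition, same output.

def pvOutletFields : List String :=
  ["outlet_number", "outlet_name", "outlet_address", "outlet_city", "outlet_state",
   "outlet_zip_code", "outlet_county_code", "outlet_naics_code",
   "outlet_inside_outside_city_limits_indicator", "outlet_permit_issue_date",
   "outlet_first_sales_date"]

-- ===== PORT A =====
-- score(outlet) = sum(1 for f in OUTLET_FIELDS if f in outlet and outlet[f])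
def pvScore (outlet : List (String × String)) : Int :=
  pvOutletFields.foldl (fun n f =>
    if (PySem.Dict.ofList outlet).contains f && ((PySem.Dict.ofList outlet).getD f "" != "") then n + 1 else n) 0

-- the inner 'for field in OUTLET_FIELDS' body of A's merge loop
def pvFillA (m : PySem.Dict String String) (outlet : List (String × String)) : PySem.Dict String String :=
  pvOutletFields.foldl (fun m f =>
    if !m.contains f || m.getD f "" == "" then
      if (PySem.Dict.ofList outlet).contains f && ((PySem.Dict.ofList outlet).getD f "" != "") then
        m.insert f ((PySem.Dict.ofList outlet).getD f "")
      else m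
    else m) m

def merge_outlet_details (outlets : List (List (String × String))) : List (String × String) :=
  match outlets with
  | [] => []
  | [o] => o
  | _ :: _ :: _ =>
    let sorted_outlets := PySem.List.sorted outlets pvScore true
    ((sorted_outlets.drop 1).foldl pvFillA
      (PySem.Dict.ofList (sorted_outlets.headD []))).items

-- ===== PORT B =====
-- score(o) = sum(1 for f in OUTLET_FIELDS if o.get(f))
def pvScoreB (o : List (String × String)) : Int :=
  pvOutletFields.foldl (fun n f =>
    if (PySem.Dict.ofList o).getD f "" != "" then n + 1 else n) 0

-- first_truthy(f, default): first truthy value for f among rest, else default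
def pvFirstTruthy (rest : List (List (String × String))) (f : String) (default : String) : String :=
  match rest with
  | [] => default
  | o :: rest' =>
    if (PySem.Dict.ofList o).getD f "" != "" then (PySem.Dict.ofList o).getD f ""
    else pvFirstTruthy rest' f default

-- one item of the head comprehension
def pvHeadItem (rest : List (List (String × String))) (kv : String × String) : String × String :=
  if pvOutletFields.contains kv.1 && kv.2 == "" then (kv.1, pvFirstTruthy rest kv.1 kv.2) else kv

-- one donor outlet's round of the tail loop (state = (seen, tail))
def pvTailOutlet (st : PySem.Set String × List (String × String)) (o : List (String × String)) :
    PySem.Set String × List (String × String) :=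
  pvOutletFields.foldl (fun st f =>
    if !PySem.Set.contains st.1 f && ((PySem.Dict.ofList o).getD f "" != "") then
      (PySem.Set.add st.1 f, st.2 ++ [(f, (PySem.Dict.ofList o).getD f "")])
    else st) st

def merge_outlet_details_alt (outlets : List (List (String × String))) : List (String × String) :=
  match outlets with
  | [] => []
  | [o] => o
  | _ :: _ :: _ =>
    let order := PySem.List.sorted outlets pvScoreB true
    let base := PySem.Dict.ofList (order.headD [])
    let rest := order.drop 1
    let head := base.items.map (pvHeadItem rest)
    let tail := (rest.foldl pvTailOutlet (PySem.Set.ofList base.keys, [])).2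
    (PySem.Dict.ofList (head ++ tail)).items

-- ===== PRECONDITION & SPEC =====
def Spec_merge_outlet_details (outlets : List (List (String × String))) (out : List (String × String)) : Prop := out = merge_outlet_details_alt outlets
instance (outlets : List (List (String × String))) (out : List (String × String)) : Decidable (Spec_merge_outlet_details outlets out) := by unfold Spec_merge_outlet_details; infer_instance

-- ===== CLAIM (what is proved, stated in full; the proofs are below) =====
def Claim_equal_merge_outlet_details : Prop := ∀ (outlets : List (List (String × String))), Dom_merge_outlet_details outlets → Spec_merge_outlet_details outlets (merge_outlet_details outlets)

-- ===== LEMMAS AND PROOFS =====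

-- proof-side abbreviations
def pvVal (o : List (String × String)) (f : String) : String := (PySem.Dict.ofList o).getD f ""

def pvNewF (fields seen : List String) (o : List (String × String)) : List String :=
  fields.filter (fun f => !seen.contains f && pvVal o f != "")

def pvUpd1F (fields : List String) (o : List (String × String)) (kv : String × String) : String × String :=
  if fields.contains kv.1 && kv.2 == "" && pvVal o kv.1 != "" then (kv.1, pvVal o kv.1) else kv

-- A's per-field source condition is plain truthiness of o.get(f)
theorem pv_cond_eq (d : PySem.Dict String String) (f : String) :
    (d.contains f && (d.getD f "" != "")) = (d.getD f "" != "") := by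
  by_cases h : d.contains f
  · simp [h]
  · simp at h
    simp [h, PySem.Dict.getD_of_not_contains d "" h]

theorem pvScore_eq : pvScore = pvScoreB := by
  funext o
  unfold pvScore pvScoreB
  congr 1
  funext n f
  rw [pv_cond_eq]

-- characterisation of one round of A's fill loop
theorem fill_fold (o : List (String × String)) (fields : List String) (hf : fields.Nodup)
    (d : PySem.Dict String String) (hd : d.keys.Nodup) :
    (fields.foldl (fun m f =>
      if !m.contains f || m.getD f "" == "" then
        if (PySem.Dict.ofList o).contains f && ((PySem.Dict.ofList o).getD f "" != "") then
          m.insert f ((PySem.Dict.ofList o).getD f "")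
        else m
      else m) d).items
    = d.items.map (pvUpd1F fields o) ++ (pvNewF fields d.keys o).map (fun f => (f, pvVal o f)) := by
  induction fields generalizing d with
  | nil =>
    simp only [List.foldl_nil, pvNewF, List.filter_nil, List.map_nil, List.append_nil]
    have hid : List.map (pvUpd1F [] o) d.items = d.items := by
      rw [List.map_congr_left (g := id) (fun kv _ => by simp [pvUpd1F]), List.map_id]
    rw [hid]
  | cons f rest ih =>
    rw [List.nodup_cons] at hf
    obtain ⟨hfr, hrest⟩ := hf
    simp only [List.foldl_cons]
    by_cases ho : (PySem.Dict.ofList o).getD f "" = ""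
    · -- the donor value is falsy: the step is a no-op
      have h1 : (if !d.contains f || d.getD f "" == "" then
            if (PySem.Dict.ofList o).contains f && ((PySem.Dict.ofList o).getD f "" != "") then
              d.insert f ((PySem.Dict.ofList o).getD f "")
            else d
          else d) = d := by
        rw [pv_cond_eq]; simp [ho]
      rw [h1, ih hrest d hd]
      congr 1
      · apply List.map_congr_left
        intro kv hkv
        by_cases hk : kv.1 = f
        · simp [pvUpd1F, hk, pvVal, ho]
        · simp [pvUpd1F, hk]
      · unfold pvNewF
        rw [List.filter_cons]
        simp [pvVal, ho]
    · have hne : ((PySem.Dict.ofList o).getD f "" != "") = true := by simp [ho]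
      by_cases hm : d.contains f = true
      · by_cases h0 : d.getD f "" = ""
        · -- present with falsy value: overwrite in place
          have h1 : (if !d.contains f || d.getD f "" == "" then
                if (PySem.Dict.ofList o).contains f && ((PySem.Dict.ofList o).getD f "" != "") then
                  d.insert f ((PySem.Dict.ofList o).getD f "")
                else d
              else d) = d.insert f ((PySem.Dict.ofList o).getD f "") := by
            rw [pv_cond_eq]; simp [h0, hne]
          rw [h1, ih hrest _ (PySem.Dict.nodup_keys_insert d f _ hd),
              PySem.Dict.items_insert_of_contains d _ hm,
              PySem.Dict.keys_insert_of_contains d _ hm, List.map_map]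
          congr 1
          · apply List.map_congr_left
            intro kv hkv
            by_cases hk : kv.1 = f
            · have hkv2 : kv.2 = "" := by
                have hg := PySem.Dict.getD_of_mem_items d (k := kv.1) (v := kv.2) (by simpa using hkv) hd ""
                rw [hk] at hg
                rw [← hg, h0]
              simp [pvUpd1F, Function.comp, hk, hkv2, pvVal, ho]
            · simp [pvUpd1F, Function.comp, hk]
          · have hfk : f ∈ d.keys := (PySem.Dict.contains_iff_mem_keys d f).mp hm
            unfold pvNewF
            rw [List.filter_cons]
            simp [hfk]
        · -- present with truthy value: no-op
          have h1 : (if !d.contains f || d.getD f "" == "" then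
                if (PySem.Dict.ofList o).contains f && ((PySem.Dict.ofList o).getD f "" != "") then
                  d.insert f ((PySem.Dict.ofList o).getD f "")
                else d
              else d) = d := by
            simp [hm, h0]
          rw [h1, ih hrest d hd]
          congr 1
          · apply List.map_congr_left
            intro kv hkv
            by_cases hk : kv.1 = f
            · have hkv2 : kv.2 ≠ "" := by
                have hg := PySem.Dict.getD_of_mem_items d (k := kv.1) (v := kv.2) (by simpa using hkv) hd ""
                rw [hk] at hg
                rw [← hg]
                exact h0
              simp [pvUpd1F, hkv2]
            · simp [pvUpd1F, hk]
          · have hfk : f ∈ d.keys := (PySem.Dict.contains_iff_mem_keys d f).mp hm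
            unfold pvNewF
            rw [List.filter_cons]
            simp [hfk]
      · -- absent: append the donor value
        have hmF : d.contains f = false := by simpa using hm
        have h1 : (if !d.contains f || d.getD f "" == "" then
              if (PySem.Dict.ofList o).contains f && ((PySem.Dict.ofList o).getD f "" != "") then
                d.insert f ((PySem.Dict.ofList o).getD f "")
              else d
            else d) = d.insert f ((PySem.Dict.ofList o).getD f "") := by
          rw [pv_cond_eq]; simp [hmF, hne]
        have hnin : f ∉ d.keys := fun h => hm ((PySem.Dict.contains_iff_mem_keys d f).mpr h)
        rw [h1, ih hrest _ (PySem.Dict.nodup_keys_insert d f _ hd),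
            PySem.Dict.items_insert_of_not_contains d _ hmF,
            PySem.Dict.keys_insert_of_not_contains d _ hmF]
        have hnf : pvNewF rest (d.keys ++ [f]) o = pvNewF rest d.keys o := by
          unfold pvNewF
          apply List.filter_congr
          intro g hg
          have hgf : g ≠ f := fun h => hfr (h ▸ hg)
          simp [hgf]
        have hhd : pvNewF (f :: rest) d.keys o = f :: pvNewF rest d.keys o := by
          unfold pvNewF
          rw [List.filter_cons]
          simp [hnin, pvVal, ho]
        rw [List.map_append, hnf, hhd]
        have hupd : pvUpd1F rest o (f, (PySem.Dict.ofList o).getD f "") =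
            (f, (PySem.Dict.ofList o).getD f "") := by
          simp [pvUpd1F, ho]
        have hmap : d.items.map (pvUpd1F rest o) = d.items.map (pvUpd1F (f :: rest) o) := by
          apply List.map_congr_left
          intro kv hkv
          have hk : kv.1 ≠ f := fun h => hnin (h ▸ PySem.Dict.mem_keys_of_mem_items d hkv)
          simp [pvUpd1F, hk]
        simp [hupd, hmap, pvVal, List.append_assoc]

theorem fillA_items (d : PySem.Dict String String) (o : List (String × String)) (hd : d.keys.Nodup) :
    (pvFillA d o).items
      = d.items.map (pvUpd1F pvOutletFields o)
        ++ (pvNewF pvOutletFields d.keys o).map (fun f => (f, pvVal o f)) :=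
  fill_fold o pvOutletFields (by decide) d hd

theorem keys_fillA (d : PySem.Dict String String) (o : List (String × String)) (hd : d.keys.Nodup) :
    (pvFillA d o).keys = d.keys ++ pvNewF pvOutletFields d.keys o := by
  show (pvFillA d o).items.map (·.1) = d.items.map (·.1) ++ pvNewF pvOutletFields d.keys o
  rw [fillA_items d o hd, List.map_append, List.map_map, List.map_map]
  congr 1
  · apply List.map_congr_left
    intro kv _
    show (pvUpd1F pvOutletFields o kv).1 = kv.1
    unfold pvUpd1F
    split <;> rfl
  · exact (List.map_congr_left (g := id) (fun g _ => rfl)).trans (List.map_id _)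

theorem nodup_keys_fillA (d : PySem.Dict String String) (o : List (String × String)) (hd : d.keys.Nodup) :
    (pvFillA d o).keys.Nodup := by
  rw [keys_fillA d o hd]
  have hnodf : pvOutletFields.Nodup := by decide
  refine List.Nodup.append hd (hnodf.filter _) ?_
  rw [List.disjoint_left]
  intro a ha hb
  have hmem := List.of_mem_filter hb
  rcases Bool.and_eq_true_iff.mp hmem with ⟨h1, _⟩
  have h1' : a ∉ d.keys := by simpa using h1
  exact h1' ha

-- one donor's round of the tail loop, characterised
theorem tail_fold (o : List (String × String)) (fields : List String) (hf : fields.Nodup)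
    (seen : List String) (acc : List (String × String)) :
    fields.foldl (fun st f =>
      if !PySem.Set.contains st.1 f && ((PySem.Dict.ofList o).getD f "" != "") then
        (PySem.Set.add st.1 f, st.2 ++ [(f, (PySem.Dict.ofList o).getD f "")])
      else st) (seen, acc)
    = (seen ++ pvNewF fields seen o, acc ++ (pvNewF fields seen o).map (fun f => (f, pvVal o f))) := by
  induction fields generalizing seen acc with
  | nil => simp [pvNewF]
  | cons f rest ih =>
    rw [List.nodup_cons] at hf
    obtain ⟨hfr, hrest⟩ := hf
    rw [List.foldl_cons]
    by_cases hc : (!PySem.Set.contains seen f && ((PySem.Dict.ofList o).getD f "" != "")) = true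
    · rw [if_pos hc]
      have hns : seen.contains f = false := by
        rcases Bool.and_eq_true_iff.mp hc with ⟨h1, _⟩
        simpa [PySem.Set.contains] using h1
      have hnm : f ∉ seen := by simpa using hns
      have hadd : PySem.Set.add seen f = seen ++ [f] := by
        simp [PySem.Set.add, PySem.Set.contains, hnm]
      rw [hadd, ih hrest]
      have hnf : pvNewF rest (seen ++ [f]) o = pvNewF rest seen o := by
        unfold pvNewF
        apply List.filter_congr
        intro g hg
        have hgf : g ≠ f := fun h => hfr (h ▸ hg)
        simp [hgf]
      have hhd : pvNewF (f :: rest) seen o = f :: pvNewF rest seen o := by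
        unfold pvNewF
        rw [List.filter_cons]
        have hp : (!seen.contains f && (pvVal o f != "")) = true := by
          rcases Bool.and_eq_true_iff.mp hc with ⟨_, h2⟩
          simp [hnm, pvVal, h2]
        rw [if_pos hp]
      rw [hnf, hhd]
      simp [pvVal, List.append_assoc]
    · rw [if_neg hc, ih hrest]
      have hhd : pvNewF (f :: rest) seen o = pvNewF rest seen o := by
        unfold pvNewF
        rw [List.filter_cons]
        have hcf : (!seen.contains f && (pvVal o f != "")) = false := by
          simpa [PySem.Set.contains, pvVal] using Bool.eq_false_iff.mpr hc
        rw [hcf]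
        simp
      rw [hhd]

-- the tail loop only appends: accumulator splits off
theorem tailOutlet_acc (o : List (String × String)) (s : PySem.Set String) (acc : List (String × String)) :
    pvTailOutlet (s, acc) o = ((pvTailOutlet (s, []) o).1, acc ++ (pvTailOutlet (s, []) o).2) := by
  unfold pvTailOutlet
  rw [tail_fold o pvOutletFields (by decide) s acc, tail_fold o pvOutletFields (by decide) s []]
  simp

theorem foldl_tailOutlet_acc (rest : List (List (String × String))) (s : PySem.Set String)
    (acc : List (String × String)) :
    rest.foldl pvTailOutlet (s, acc)
      = ((rest.foldl pvTailOutlet (s, [])).1, acc ++ (rest.foldl pvTailOutlet (s, [])).2) := by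
  induction rest generalizing s acc with
  | nil => simp
  | cons o rest ih =>
    rw [List.foldl_cons, List.foldl_cons, tailOutlet_acc o s acc]
    rcases hST : pvTailOutlet (s, []) o with ⟨S, T⟩
    rw [ih S (acc ++ T), ih S T]
    simp [List.append_assoc]

-- the main invariant: A's destructive fold computes B's head ++ tail
theorem main_inv (rest : List (List (String × String))) (d : PySem.Dict String String)
    (hd : d.keys.Nodup) :
    (rest.foldl pvFillA d).items
      = d.items.map (pvHeadItem rest) ++ (rest.foldl pvTailOutlet (PySem.Set.ofList d.keys, [])).2 := by
  induction rest generalizing d with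
  | nil =>
    simp only [List.foldl_nil, List.append_nil]
    have hmap : d.items.map (pvHeadItem []) = d.items := by
      rw [List.map_congr_left (g := id)
            (fun kv _ => by unfold pvHeadItem pvFirstTruthy; split <;> rfl), List.map_id]
    rw [hmap]
  | cons o rest ih =>
    simp only [List.foldl_cons]
    rw [ih (pvFillA d o) (nodup_keys_fillA d o hd), fillA_items d o hd]
    have hks : PySem.Set.ofList d.keys = d.keys := PySem.Set.ofList_eq_self_of_nodup _ hd
    have hk2 : PySem.Set.ofList (pvFillA d o).keys = d.keys ++ pvNewF pvOutletFields d.keys o := by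
      rw [keys_fillA d o hd]
      exact PySem.Set.ofList_eq_self_of_nodup _
        (by rw [← keys_fillA d o hd]; exact nodup_keys_fillA d o hd)
    rw [hk2]
    have hto : pvTailOutlet (PySem.Set.ofList d.keys, []) o
        = (d.keys ++ pvNewF pvOutletFields d.keys o,
           (pvNewF pvOutletFields d.keys o).map (fun f => (f, pvVal o f))) := by
      rw [hks]
      unfold pvTailOutlet
      have := tail_fold o pvOutletFields (by decide) d.keys []
      simpa using this
    rw [hto, foldl_tailOutlet_acc rest (d.keys ++ pvNewF pvOutletFields d.keys o)
          ((pvNewF pvOutletFields d.keys o).map (fun f => (f, pvVal o f))),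
        List.map_append, List.map_map]
    have hcomp : d.items.map (pvHeadItem rest ∘ pvUpd1F pvOutletFields o)
        = d.items.map (pvHeadItem (o :: rest)) := by
      apply List.map_congr_left
      intro kv _
      show pvHeadItem rest (pvUpd1F pvOutletFields o kv) = pvHeadItem (o :: rest) kv
      by_cases h1 : kv.1 ∈ pvOutletFields
      · by_cases h2 : kv.2 = ""
        · by_cases ho : (PySem.Dict.ofList o).getD kv.1 "" = ""
          · simp [pvHeadItem, pvUpd1F, pvVal, pvFirstTruthy, h1, h2, ho]
          · simp [pvHeadItem, pvUpd1F, pvVal, pvFirstTruthy, h1, h2, ho]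
        · simp [pvHeadItem, pvUpd1F, pvVal, h1, h2]
      · simp [pvHeadItem, pvUpd1F, pvVal, h1]
    have hmap2 : ((pvNewF pvOutletFields d.keys o).map (fun f => (f, pvVal o f))).map (pvHeadItem rest)
        = (pvNewF pvOutletFields d.keys o).map (fun f => (f, pvVal o f)) := by
      rw [List.map_map]
      apply List.map_congr_left
      intro g hg
      have hgt : pvVal o g ≠ "" := by
        have hmem := List.of_mem_filter hg
        rcases Bool.and_eq_true_iff.mp hmem with ⟨_, h2⟩
        simpa using h2
      show pvHeadItem rest (g, pvVal o g) = (g, pvVal o g)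
      unfold pvHeadItem
      simp [hgt]
    rw [hcomp, hmap2]
    simp [List.append_assoc]

theorem nodup_keys_foldl_fillA (rest : List (List (String × String))) (d : PySem.Dict String String)
    (hd : d.keys.Nodup) : (rest.foldl pvFillA d).keys.Nodup := by
  induction rest generalizing d with
  | nil => exact hd
  | cons o rest ih =>
    rw [List.foldl_cons]
    exact ih _ (nodup_keys_fillA d o hd)

theorem ofList_items_of_nodup (l : List (String × String)) (h : (l.map Prod.fst).Nodup) :
    (PySem.Dict.ofList l).items = l := by
  have hfresh := PySem.Dict.items_foldl_insert_fresh l Prod.fst Prod.snd PySem.Dict.empty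
    (fun a _ => by simp) h
  show (List.foldl (fun acc p => acc.insert p.1 p.2) PySem.Dict.empty l).items = l
  rw [hfresh]
  simp [PySem.Dict.empty]

-- ===== VERDICT (by name: the statement is the Claim_ definition above) =====
theorem merge_outlet_details_spec : Claim_equal_merge_outlet_details := by
  intro outlets _
  unfold Spec_merge_outlet_details
  match outlets with
  | [] => rfl
  | [o] => rfl
  | a :: b :: rest =>
    show (((PySem.List.sorted (a :: b :: rest) pvScore true).drop 1).foldl pvFillA
        (PySem.Dict.ofList ((PySem.List.sorted (a :: b :: rest) pvScore true).headD []))).items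
      = (PySem.Dict.ofList
          ((PySem.Dict.ofList ((PySem.List.sorted (a :: b :: rest) pvScoreB true).headD [])).items.map
              (pvHeadItem ((PySem.List.sorted (a :: b :: rest) pvScoreB true).drop 1))
            ++ (((PySem.List.sorted (a :: b :: rest) pvScoreB true).drop 1).foldl pvTailOutlet
                (PySem.Set.ofList
                  (PySem.Dict.ofList ((PySem.List.sorted (a :: b :: rest) pvScoreB true).headD [])).keys,
                 [])).2)).items
    rw [pvScore_eq]
    have hmain := main_inv ((PySem.List.sorted (a :: b :: rest) pvScoreB true).drop 1)
      (PySem.Dict.ofList ((PySem.List.sorted (a :: b :: rest) pvScoreB true).headD []))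
      (PySem.Dict.nodup_keys_ofList _)
    have hnod : (((PySem.Dict.ofList ((PySem.List.sorted (a :: b :: rest) pvScoreB true).headD [])).items.map
          (pvHeadItem ((PySem.List.sorted (a :: b :: rest) pvScoreB true).drop 1))
        ++ (((PySem.List.sorted (a :: b :: rest) pvScoreB true).drop 1).foldl pvTailOutlet
            (PySem.Set.ofList
              (PySem.Dict.ofList ((PySem.List.sorted (a :: b :: rest) pvScoreB true).headD [])).keys,
             [])).2).map Prod.fst).Nodup := by
      rw [← hmain]
      exact nodup_keys_foldl_fillA _ _ (PySem.Dict.nodup_keys_ofList _)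
    rw [ofList_items_of_nodup _ hnod]
    exact hmain
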